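-- pv_equiv track=rewrite | github.com/yizaochen/fluctmatch | fluctmatch/miscell.py | get_d_by_vector
-- ===== SOURCE A (Python) =====
-- def get_d_by_vector(vector):
--     d = dict()
--     atomid = 0
--     for idx, data in enumerate(vector):
--         if idx % 3 == 0:
--             atomid += 1
--             d[atomid] = dict()
--             d[atomid]['x'] = data
--         elif idx % 3 == 1:
--             d[atomid]['y'] = data
--         else:
--             d[atomid]['z'] = data
--     return d
-- ===== SOURCE B (Python) =====
-- def get_d_by_vector(vector):
--     d = {}
--     atomid = 0
--     i = 0
--     n = len(vector)
--     while i < n: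
--         atomid += 1
--         d[atomid] = dict(zip(('x', 'y', 'z'), vector[i:i+3]))
--         i += 3
--     return d
-- ===== Notes on version B (the rewrite author's own statement) =====
-- stated objective: simpler
-- what changed: B walks chunk starts in strides of three and builds each atom's dict in one shot with dict(zip(('x','y','z'), vector[i:i+3])), replacing A's per-element index-modulo branching that mutates the current entry field by field.
import Mathlib
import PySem

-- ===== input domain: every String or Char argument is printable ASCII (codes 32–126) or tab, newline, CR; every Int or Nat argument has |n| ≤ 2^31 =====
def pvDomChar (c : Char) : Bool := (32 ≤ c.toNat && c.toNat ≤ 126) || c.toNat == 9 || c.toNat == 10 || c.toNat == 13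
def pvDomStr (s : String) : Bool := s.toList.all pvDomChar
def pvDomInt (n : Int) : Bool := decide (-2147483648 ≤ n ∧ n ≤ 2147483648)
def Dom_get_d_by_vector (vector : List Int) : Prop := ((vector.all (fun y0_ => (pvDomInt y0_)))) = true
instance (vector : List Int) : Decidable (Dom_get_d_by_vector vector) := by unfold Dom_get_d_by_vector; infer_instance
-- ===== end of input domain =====

-- B replaces A's per-element index-modulo branching by chunk-wise traversal (three elements per atom); objective: simpler.

-- ===== PORT A =====
-- loop body of A; d[atomid]['y'] = data is a mutation of an always-present key, so
-- Dict.modify with an (unreachable) empty default is exact on every reachable state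
def pvStepA (st : PySem.Dict Int (PySem.Dict String Int) × Int) (p : Int × Int) :
    PySem.Dict Int (PySem.Dict String Int) × Int :=
  if PySem.Int.mod p.1 3 = 0 then
    (st.1.insert (st.2 + 1) (PySem.Dict.empty.insert "x" p.2), st.2 + 1)
  else if PySem.Int.mod p.1 3 = 1 then
    (st.1.modify st.2 PySem.Dict.empty (fun inner => inner.insert "y" p.2), st.2)
  else
    (st.1.modify st.2 PySem.Dict.empty (fun inner => inner.insert "z" p.2), st.2)

def get_d_by_vector (vector : List Int) : List (Int × List (String × Int)) :=
  let st := (PySem.List.enumerate vector 0).foldl pvStepA (PySem.Dict.empty, 0)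
  st.1.items.map (fun p => (p.1, p.2.items))

-- ===== PORT B =====
-- while i < n: atomid += 1; d[atomid] = dict(zip(('x','y','z'), vector[i:i+3])); i += 3
-- the loop index i is a nonnegative counter, carried as Nat; each fresh key atomid
-- appends its pair (dict(zip(..)) over the distinct keys 'x','y','z' IS the zipped pair list)
def pvAltB (vector : List Int) (i : Nat) (atomid : Int) : List (Int × List (String × Int)) :=
  if i < vector.length then
    (atomid + 1, ["x", "y", "z"].zip (PySem.List.slice vector (some (i : Int)) (some ((i : Int) + 3))))
      :: pvAltB vector (i + 3) (atomid + 1)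
  else []
termination_by vector.length - i

def get_d_by_vector_alt (vector : List Int) : List (Int × List (String × Int)) :=
  pvAltB vector 0 0

-- ===== PRECONDITION & SPEC =====
def Spec_get_d_by_vector (vector : List Int) (out : List (Int × List (String × Int))) : Prop := out = get_d_by_vector_alt vector
instance (vector : List Int) (out : List (Int × List (String × Int))) : Decidable (Spec_get_d_by_vector vector out) := by unfold Spec_get_d_by_vector; infer_instance

-- ===== CLAIM (what is proved, stated in full; the proofs are below) =====
def Claim_equal_get_d_by_vector : Prop := ∀ (vector : List Int), Dom_get_d_by_vector vector → Spec_get_d_by_vector vector (get_d_by_vector vector)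

-- ===== LEMMAS AND PROOFS =====

-- B's output, recast as structural recursion over three-element chunks (proof helper)
def pvAltGo : List Int → Int → List (Int × List (String × Int))
  | [], _ => []
  | [x], atomid => [(atomid + 1, [("x", x)])]
  | [x, y], atomid => [(atomid + 1, [("x", x), ("y", y)])]
  | x :: y :: z :: rest, atomid =>
      (atomid + 1, [("x", x), ("y", y), ("z", z)]) :: pvAltGo rest (atomid + 1)

lemma pv_altB_eq (vector : List Int) (i : Nat) (atomid : Int) :
    pvAltB vector i atomid = pvAltGo (vector.drop i) atomid := by
  rw [pvAltB]
  have hslice : PySem.List.slice vector (some (i : Int)) (some ((i : Int) + 3))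
      = (vector.drop i).take 3 := by
    have := PySem.List.slice_natCast_add vector i 3
    simpa using this
  by_cases h : i < vector.length
  · rw [if_pos h, hslice, pv_altB_eq vector (i + 3) (atomid + 1)]
    have hdrop : vector.drop (i + 3) = (vector.drop i).drop 3 := by
      rw [List.drop_drop]
    rw [hdrop]
    have hne : vector.drop i ≠ [] := by
      intro hnil
      have := List.drop_eq_nil_iff.mp hnil
      omega
    match hd : vector.drop i with
    | [] => exact absurd hd hne
    | [x] => simp [pvAltGo, List.zip]
    | [x, y] => simp [pvAltGo, List.zip]
    | x :: y :: z :: t => simp [pvAltGo, List.zip]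
  · rw [if_neg h]
    rw [List.drop_eq_nil_iff.mpr (by omega)]
    rfl
termination_by vector.length - i

-- the A-side dict entries produced for v starting at atomid, as a plain items list
def pvChunksD : List Int → Int → List (Int × PySem.Dict String Int)
  | [], _ => []
  | [x], atomid => [(atomid + 1, PySem.Dict.empty.insert "x" x)]
  | [x, y], atomid => [(atomid + 1, (PySem.Dict.empty.insert "x" x).insert "y" y)]
  | x :: y :: z :: rest, atomid =>
      (atomid + 1, ((PySem.Dict.empty.insert "x" x).insert "y" y).insert "z" z) :: pvChunksD rest (atomid + 1)

def pvNumAtoms (v : List Int) : Int := ((v.length + 2) / 3 : Nat)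

lemma pv_insert_fresh {κ ν : Type} [BEq κ] (l : List (κ × ν)) (k : κ) (v : ν)
    (h : ∀ p ∈ l, (p.1 == k) = false) :
    (PySem.Dict.mk l).insert k v = PySem.Dict.mk (l ++ [(k, v)]) := by
  have hc : (PySem.Dict.mk l).contains k = false := by
    simp [PySem.Dict.contains, List.any_eq_false]
    intro a b hab
    simpa using h (a, b) hab
  simp [PySem.Dict.insert, hc]

lemma pv_getD_last {κ ν : Type} [BEq κ] [LawfulBEq κ] (l : List (κ × ν)) (k : κ) (v d0 : ν)
    (h : ∀ p ∈ l, (p.1 == k) = false) :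
    (PySem.Dict.mk (l ++ [(k, v)])).getD k d0 = v := by
  have hf : List.find? (fun p => p.1 == k) l = none :=
    List.find?_eq_none.mpr (by intro p hp; simp [h p hp])
  simp [PySem.Dict.getD, PySem.Dict.get?, List.find?_append, hf]

lemma pv_map_overwrite {κ ν : Type} [BEq κ] [LawfulBEq κ] (l : List (κ × ν)) (k : κ) (v w : ν)
    (h : ∀ p ∈ l, (p.1 == k) = false) :
    List.map (fun p => if (p.1 == k) = true then (k, w) else p) (l ++ [(k, v)]) = l ++ [(k, w)] := by
  induction l with
  | nil => simp
  | cons p t ih =>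
      simp only [List.cons_append, List.map_cons]
      rw [ih (fun q hq => h q (by simp [hq]))]
      simp [h p (by simp)]

lemma pv_modify_last {κ ν : Type} [BEq κ] [LawfulBEq κ] (l : List (κ × ν)) (k : κ) (v d0 : ν)
    (f : ν → ν) (h : ∀ p ∈ l, (p.1 == k) = false) :
    (PySem.Dict.mk (l ++ [(k, v)])).modify k d0 f = PySem.Dict.mk (l ++ [(k, f v)]) := by
  have hc : (PySem.Dict.mk (l ++ [(k, v)])).contains k = true := by
    simp [PySem.Dict.contains]
  simp only [PySem.Dict.modify, pv_getD_last l k v d0 h, PySem.Dict.insert, hc, if_pos]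
  exact congrArg PySem.Dict.mk (pv_map_overwrite l k v (f v) h)

lemma pv_fresh_of_lt (l : List (Int × PySem.Dict String Int)) (aid : Int)
    (h : ∀ p ∈ l, p.1 < aid + 1) : ∀ p ∈ l, (p.1 == aid + 1) = false := by
  intro p hp
  have := h p hp
  simp only [beq_eq_false_iff_ne, ne_eq]
  omega

lemma pv_foldA_chunks : ∀ (v : List Int) (n : ℕ) (l : List (Int × PySem.Dict String Int)) (aid : Int),
    (∀ p ∈ l, p.1 < aid + 1) →
    (PySem.List.enumerate v (3 * (n : Int))).foldl pvStepA (PySem.Dict.mk l, aid)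
      = (PySem.Dict.mk (l ++ pvChunksD v aid), aid + pvNumAtoms v)
  | [], n, l, aid, h => by
      simp [pvChunksD, pvNumAtoms, PySem.List.enumerate]
  | [x], n, l, aid, h => by
      simp only [PySem.List.enumerate, List.foldl_cons, List.foldl_nil]
      rw [show pvStepA (PySem.Dict.mk l, aid) (3 * (n : Int), x)
            = (PySem.Dict.mk (l ++ [(aid + 1, PySem.Dict.empty.insert "x" x)]), aid + 1) by
        simp [pvStepA, pv_insert_fresh l (aid + 1) _ (pv_fresh_of_lt l aid h)]]
      simp [pvChunksD, pvNumAtoms]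
  | [x, y], n, l, aid, h => by
      simp only [PySem.List.enumerate, List.foldl_cons, List.foldl_nil]
      rw [show pvStepA (PySem.Dict.mk l, aid) (3 * (n : Int), x)
            = (PySem.Dict.mk (l ++ [(aid + 1, PySem.Dict.empty.insert "x" x)]), aid + 1) by
        simp [pvStepA, pv_insert_fresh l (aid + 1) _ (pv_fresh_of_lt l aid h)]]
      rw [show pvStepA (PySem.Dict.mk (l ++ [(aid + 1, PySem.Dict.empty.insert "x" x)]), aid + 1)
            (3 * (n : Int) + 1, y)
            = (PySem.Dict.mk (l ++ [(aid + 1, (PySem.Dict.empty.insert "x" x).insert "y" y)]), aid + 1) by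
        simp [pvStepA,
          pv_modify_last l (aid + 1) _ PySem.Dict.empty _ (pv_fresh_of_lt l aid h)]]
      simp [pvChunksD, pvNumAtoms]
  | x :: y :: z :: t, n, l, aid, h => by
      simp only [PySem.List.enumerate, List.foldl_cons]
      rw [show pvStepA (PySem.Dict.mk l, aid) (3 * (n : Int), x)
            = (PySem.Dict.mk (l ++ [(aid + 1, PySem.Dict.empty.insert "x" x)]), aid + 1) by
        simp [pvStepA, pv_insert_fresh l (aid + 1) _ (pv_fresh_of_lt l aid h)]]
      rw [show pvStepA (PySem.Dict.mk (l ++ [(aid + 1, PySem.Dict.empty.insert "x" x)]), aid + 1)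
            (3 * (n : Int) + 1, y)
            = (PySem.Dict.mk (l ++ [(aid + 1, (PySem.Dict.empty.insert "x" x).insert "y" y)]), aid + 1) by
        simp [pvStepA,
          pv_modify_last l (aid + 1) _ PySem.Dict.empty _ (pv_fresh_of_lt l aid h)]]
      rw [show pvStepA
            (PySem.Dict.mk (l ++ [(aid + 1, (PySem.Dict.empty.insert "x" x).insert "y" y)]), aid + 1)
            (3 * (n : Int) + 1 + 1, z)
            = (PySem.Dict.mk
                (l ++ [(aid + 1, ((PySem.Dict.empty.insert "x" x).insert "y" y).insert "z" z)]),
               aid + 1) by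
        simp [pvStepA, show ¬((3 : Int) ∣ 3 * (n : Int) + 1 + 1) by omega,
          show ¬((3 * (n : Int) + 1 + 1) % 3 = 1) by omega,
          pv_modify_last l (aid + 1) _ PySem.Dict.empty _ (pv_fresh_of_lt l aid h)]]
      rw [show (3 * (n : Int) + 1 + 1 + 1) = 3 * ((n + 1 : ℕ) : Int) by push_cast; ring]
      rw [pv_foldA_chunks t (n + 1)
            (l ++ [(aid + 1, ((PySem.Dict.empty.insert "x" x).insert "y" y).insert "z" z)]) (aid + 1)
            (by intro p hp
                simp only [List.mem_append, List.mem_singleton] at hp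
                rcases hp with hp | hp
                · have := h p hp; omega
                · subst hp; simp)]
      simp only [pvChunksD, pvNumAtoms, List.append_assoc, List.singleton_append, List.length_cons]
      rw [Prod.mk.injEq]
      refine ⟨rfl, ?_⟩
      push_cast
      omega

lemma pv_chunksD_items : ∀ (v : List Int) (aid : Int),
    (pvChunksD v aid).map (fun p => (p.1, p.2.items)) = pvAltGo v aid
  | [], aid => by simp [pvChunksD, pvAltGo]
  | [x], aid => by
      simp [pvChunksD, pvAltGo, PySem.Dict.insert, PySem.Dict.contains, PySem.Dict.empty]
  | [x, y], aid => by
      simp [pvChunksD, pvAltGo, PySem.Dict.insert, PySem.Dict.contains, PySem.Dict.empty]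
  | x :: y :: z :: t, aid => by
      simp only [pvChunksD, pvAltGo, List.map_cons, pv_chunksD_items t (aid + 1)]
      simp [PySem.Dict.insert, PySem.Dict.contains, PySem.Dict.empty]

-- ===== VERDICT (by name: the statement is the Claim_ definition above) =====
theorem get_d_by_vector_spec : Claim_equal_get_d_by_vector := by
  intro v _
  unfold Spec_get_d_by_vector get_d_by_vector get_d_by_vector_alt
  have hfold := pv_foldA_chunks v 0 [] 0 (by simp)
  norm_num at hfold
  have hempty : (PySem.Dict.empty : PySem.Dict Int (PySem.Dict String Int)) = PySem.Dict.mk [] := rfl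
  rw [hempty, hfold, pv_altB_eq v 0 0, List.drop_zero]
  simpa [PySem.Dict.items] using pv_chunksD_items v 0
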